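-- pv_equiv track=rewrite | github.com/pavlo-seimskyi/crypto-bot | src/dataloaders/abstract.py | partition_timestamps_into_days
-- ===== SOURCE A (Python) =====
-- from typing import List, Tuple
--
-- def partition_timestamps_into_days(
--     start: int, end: int
-- ) -> List[Tuple[int, int]]:
--     # hours * minutes * seconds * milliseconds
--     milliseconds_per_day = 24 * 60 * 60 * 1000
--     daily_chunks = []
--
--     current_timestamp = start
--     next_midnight = (start // milliseconds_per_day + 1) * milliseconds_per_day
--
--     # Add the first chunk, which might be incomplete
--     if next_midnight <= end:
--         daily_chunks.append((current_timestamp, next_midnight))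
--         current_timestamp = next_midnight
--
--     # Add the complete chunks
--     while current_timestamp + milliseconds_per_day <= end:
--         next_day = current_timestamp + milliseconds_per_day
--         daily_chunks.append((current_timestamp, next_day))
--         current_timestamp = next_day
--
--     # Add the last chunk, which might be incomplete
--     if current_timestamp < end:
--         daily_chunks.append((current_timestamp, end))
--
--     return daily_chunks
-- ===== SOURCE B (Python) =====
-- def partition_timestamps_into_days(start, end):
--     mpd = 24 * 60 * 60 * 1000
--     if start >= end:
--         return []
--     first_midnight = (start // mpd + 1) * mpd
--     boundaries = [start] + list(range(first_midnight, end, mpd)) + [end]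
--     return list(zip(boundaries, boundaries[1:]))
-- ===== Notes on version B (the rewrite author's own statement) =====
-- stated objective: simpler
-- what changed: B computes all day boundaries up front (first midnight via one floor-division plus a range) and pairs adjacent boundaries with zip, replacing A's accumulator loop with first-partial/full/last-partial branches.
import Mathlib
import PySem

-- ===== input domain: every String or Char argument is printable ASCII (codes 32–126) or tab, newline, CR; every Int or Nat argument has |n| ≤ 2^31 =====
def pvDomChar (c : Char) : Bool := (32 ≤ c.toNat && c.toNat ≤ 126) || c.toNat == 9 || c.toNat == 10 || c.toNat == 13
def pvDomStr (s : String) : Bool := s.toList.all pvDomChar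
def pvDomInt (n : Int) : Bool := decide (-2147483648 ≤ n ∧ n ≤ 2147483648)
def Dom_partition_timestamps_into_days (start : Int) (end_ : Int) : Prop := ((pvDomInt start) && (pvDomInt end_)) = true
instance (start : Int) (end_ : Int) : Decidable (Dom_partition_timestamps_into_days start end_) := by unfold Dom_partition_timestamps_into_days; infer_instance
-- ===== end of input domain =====

-- B builds the boundary list up front and zips adjacent boundaries, instead of A's
-- accumulator loop with first-partial / full / last-partial branches (objective: simpler).

-- ===== PORT A =====
-- while-loop of A together with the trailing partial-chunk `if`, as structural recursion
-- on the same state (current_timestamp).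
def pyA_rest (end_ cur : Int) : List (Int × Int) :=
  if _h : cur + 86400000 ≤ end_ then
    (cur, cur + 86400000) :: pyA_rest end_ (cur + 86400000)
  else if cur < end_ then [(cur, end_)] else []
termination_by (end_ - cur).toNat
decreasing_by omega

def partition_timestamps_into_days (start : Int) (end_ : Int) : List (Int × Int) :=
  let milliseconds_per_day : Int := 24 * 60 * 60 * 1000
  let next_midnight := (PySem.Int.floordiv start milliseconds_per_day + 1) * milliseconds_per_day
  if next_midnight ≤ end_ then
    (start, next_midnight) :: pyA_rest end_ next_midnight
  else
    pyA_rest end_ start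

-- ===== PORT B =====
def partition_timestamps_into_days_alt (start : Int) (end_ : Int) : List (Int × Int) :=
  let mpd : Int := 24 * 60 * 60 * 1000
  if start ≥ end_ then []
  else
    let first_midnight := (PySem.Int.floordiv start mpd + 1) * mpd
    let boundaries := start :: (PySem.List.pyRange first_midnight end_ mpd ++ [end_])
    boundaries.zip (boundaries.drop 1)

-- ===== PRECONDITION & SPEC =====
def Spec_partition_timestamps_into_days (start : Int) (end_ : Int) (out : List (Int × Int)) : Prop := out = partition_timestamps_into_days_alt start end_
instance (start : Int) (end_ : Int) (out : List (Int × Int)) : Decidable (Spec_partition_timestamps_into_days start end_ out) := by unfold Spec_partition_timestamps_into_days; infer_instance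

-- ===== CLAIM (what is proved, stated in full; the proofs are below) =====
def Claim_equal_partition_timestamps_into_days : Prop := ∀ (start : Int) (end_ : Int), Dom_partition_timestamps_into_days start end_ → Spec_partition_timestamps_into_days start end_ (partition_timestamps_into_days start end_)

-- ===== LEMMAS AND PROOFS =====

theorem pyRange_pos_nil (a b s : Int) (hs : 0 < s) (h : b ≤ a) :
    PySem.List.pyRange a b s = [] := by
  rw [PySem.List.pyRange_of_pos a b hs]
  have : ¬ a < b := by omega
  simp [this]

theorem pyRange_pos_cons (a b s : Int) (hs : 0 < s) (h : a < b) :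
    PySem.List.pyRange a b s = a :: PySem.List.pyRange (a + s) b s := by
  rw [PySem.List.pyRange_of_pos a b hs, PySem.List.pyRange_of_pos (a + s) b hs]
  have hcount : (if a < b then ((b - a + s - 1) / s).toNat else 0)
      = (if a + s < b then ((b - (a + s) + s - 1) / s).toNat else 0) + 1 := by
    rw [if_pos h]
    by_cases h2 : a + s < b
    · rw [if_pos h2]
      have hstep : (b - a - 1 + 1 * s) / s = (b - a - 1) / s + 1 :=
        Int.add_mul_ediv_right _ 1 (by omega)
      have he : b - a + s - 1 = b - a - 1 + 1 * s := by ring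
      have he2 : b - (a + s) + s - 1 = b - a - 1 := by ring
      have hge : 0 ≤ (b - a - 1) / s := Int.ediv_nonneg (by omega) (by omega)
      rw [he, he2, hstep]
      omega
    · rw [if_neg h2]
      have hr : 0 ≤ b - a - 1 := by omega
      have hrs : b - a - 1 < s := by omega
      have hstep : (b - a - 1 + 1 * s) / s = (b - a - 1) / s + 1 :=
        Int.add_mul_ediv_right _ 1 (by omega)
      have hz : (b - a - 1) / s = 0 := Int.ediv_eq_zero_of_lt hr hrs
      have he : b - a + s - 1 = b - a - 1 + 1 * s := by ring
      rw [he, hstep, hz]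
      omega
  rw [hcount, List.range_succ_eq_map]
  simp only [List.map_cons, List.map_map]
  congr 1
  · simp
  · apply List.map_congr_left
    intro k _
    simp only [Function.comp_apply]
    push_cast
    ring

-- Characterisation of A's loop as a zip of adjacent boundaries.
theorem pyA_rest_eq (end_ : Int) : ∀ (N : Nat) (c : Int), (end_ - c).toNat ≤ N → c < end_ →
    pyA_rest end_ c =
      (c :: (PySem.List.pyRange (c + 86400000) end_ 86400000 ++ [end_])).zip
        (PySem.List.pyRange (c + 86400000) end_ 86400000 ++ [end_]) := by
  intro N
  induction N with
  | zero => intro c hN hc; omega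
  | succ N ih =>
    intro c hN hc
    rw [pyA_rest]
    by_cases h1 : c + 86400000 ≤ end_
    · rw [dif_pos h1]
      by_cases h2 : c + 86400000 < end_
      · rw [pyRange_pos_cons (c + 86400000) end_ 86400000 (by omega) h2]
        rw [ih (c + 86400000) (by omega) h2]
        simp [List.zip]
      · have he : c + 86400000 = end_ := by omega
        rw [pyRange_pos_nil (c + 86400000) end_ 86400000 (by omega) (by omega)]
        rw [pyA_rest]
        rw [dif_neg (by omega)]
        rw [if_neg (by omega)]
        simp [List.zip, he]
    · rw [dif_neg h1]
      rw [if_pos hc]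
      rw [pyRange_pos_nil (c + 86400000) end_ 86400000 (by omega) (by omega)]
      simp [List.zip]

theorem nm_bounds (start : Int) :
    start < (PySem.Int.floordiv start 86400000 + 1) * 86400000 ∧
    (PySem.Int.floordiv start 86400000 + 1) * 86400000 ≤ start + 86400000 := by
  rw [PySem.Int.floordiv_eq_ediv_of_pos (by omega : (0:Int) < 86400000)]
  omega

-- ===== VERDICT (by name: the statement is the Claim_ definition above) =====
theorem partition_timestamps_into_days_spec : Claim_equal_partition_timestamps_into_days := by
  intro start end_ _
  unfold Spec_partition_timestamps_into_days
  unfold partition_timestamps_into_days partition_timestamps_into_days_alt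
  simp only []
  have hmpd : (24 * 60 * 60 * 1000 : Int) = 86400000 := by norm_num
  rw [hmpd]
  have hb := nm_bounds start
  set nm := (PySem.Int.floordiv start 86400000 + 1) * 86400000 with hnm
  by_cases hse : start ≥ end_
  · rw [if_pos hse]
    rw [if_neg (by omega)]
    rw [pyA_rest]
    rw [dif_neg (by omega), if_neg (by omega)]
  · rw [if_neg hse]
    by_cases h1 : nm ≤ end_
    · rw [if_pos h1]
      by_cases h2 : nm < end_
      · rw [pyA_rest_eq end_ (end_ - nm).toNat nm (by omega) h2]
        rw [pyRange_pos_cons nm end_ 86400000 (by omega) h2]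
        simp [List.zip]
      · have he : nm = end_ := by omega
        rw [pyA_rest]
        rw [dif_neg (by omega), if_neg (by omega)]
        rw [pyRange_pos_nil nm end_ 86400000 (by omega) (by omega)]
        simp [List.zip, he]
    · rw [if_neg h1]
      rw [pyA_rest_eq end_ (end_ - start).toNat start (by omega) (by omega)]
      rw [pyRange_pos_nil nm end_ 86400000 (by omega) (by omega)]
      rw [pyRange_pos_nil (start + 86400000) end_ 86400000 (by omega) (by omega)]
      simp [List.zip]
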